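-- pv_equiv track=rewrite | github.com/sttsmet/scholarly-similarity | src/eval/benchmark.py | _provenance_group
-- ===== SOURCE A (Python) =====
-- def _provenance_group(origin_flags: object) -> str:
--     values = set(str(item).strip() for item in (origin_flags or []) if str(item).strip())
--     if "seed_reference" in values or "direct_neighbor" in values:
--         return "strong_lineage"
--     if "seed_related" in values:
--         return "seed_related"
--     if "hard_negative" in values:
--         return "hard_negative"
--     return "other"
-- ===== SOURCE B (Python) =====
-- def _provenance_group(origin_flags: object) -> str:
--     # single pass keeping the best (smallest) priority rank; no set is built
--     def rank(item):
--         t = str(item).strip()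
--         if t == "seed_reference" or t == "direct_neighbor":
--             return 1
--         if t == "seed_related":
--             return 2
--         if t == "hard_negative":
--             return 3
--         return 4
--     best = 4
--     for item in (origin_flags or []):
--         best = min(best, rank(item))
--     if best == 1:
--         return "strong_lineage"
--     if best == 2:
--         return "seed_related"
--     if best == 3:
--         return "hard_negative"
--     return "other"
-- ===== Notes on version B (the rewrite author's own statement) =====
-- stated objective: alternative
-- what changed: Replaces the set comprehension plus three ordered membership tests by a single scan that maps each stripped flag to a priority rank and keeps the minimum, decoding the final rank to the group name.
import Mathlib
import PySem

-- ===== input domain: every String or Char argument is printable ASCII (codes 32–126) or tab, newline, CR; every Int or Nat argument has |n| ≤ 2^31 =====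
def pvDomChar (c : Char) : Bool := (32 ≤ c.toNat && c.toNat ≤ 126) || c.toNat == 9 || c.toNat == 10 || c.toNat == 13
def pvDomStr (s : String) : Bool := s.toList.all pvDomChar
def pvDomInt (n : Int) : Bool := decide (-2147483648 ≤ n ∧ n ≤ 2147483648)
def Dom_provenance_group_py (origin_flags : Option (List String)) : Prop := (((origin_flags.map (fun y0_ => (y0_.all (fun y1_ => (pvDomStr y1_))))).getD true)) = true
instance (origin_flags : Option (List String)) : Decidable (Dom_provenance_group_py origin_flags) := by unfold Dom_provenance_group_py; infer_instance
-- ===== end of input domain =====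

-- B replaces A's set-of-values plus ordered membership tests by one scan keeping a minimal priority rank (alternative decomposition, same cost).


-- ===== PORT A =====
def provenance_group_py (origin_flags : Option (List String)) : String :=
  let values : PySem.Set String :=
    PySem.Set.ofList (((origin_flags.getD []).map (fun item => PySem.Str.strip item)).filter (fun t => t ≠ ""))
  if values.contains "seed_reference" || values.contains "direct_neighbor" then "strong_lineage"
  else if values.contains "seed_related" then "seed_related"
  else if values.contains "hard_negative" then "hard_negative"
  else "other"

-- ===== PORT B =====
def pvRank (item : String) : Nat :=
  let t := PySem.Str.strip item
  if t = "seed_reference" ∨ t = "direct_neighbor" then 1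
  else if t = "seed_related" then 2
  else if t = "hard_negative" then 3
  else 4

def provenance_group_py_alt (origin_flags : Option (List String)) : String :=
  let best := (origin_flags.getD []).foldl (fun b item => min b (pvRank item)) 4
  if best = 1 then "strong_lineage"
  else if best = 2 then "seed_related"
  else if best = 3 then "hard_negative"
  else "other"

-- ===== PRECONDITION & SPEC =====
def Spec_provenance_group_py (origin_flags : Option (List String)) (out : String) : Prop := out = provenance_group_py_alt origin_flags
instance (origin_flags : Option (List String)) (out : String) : Decidable (Spec_provenance_group_py origin_flags out) := by unfold Spec_provenance_group_py; infer_instance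

-- ===== CLAIM (what is proved, stated in full; the proofs are below) =====
def Claim_equal_provenance_group_py : Prop := ∀ (origin_flags : Option (List String)), Dom_provenance_group_py origin_flags → Spec_provenance_group_py origin_flags (provenance_group_py origin_flags)

-- ===== LEMMAS AND PROOFS =====

lemma pvRank_cases (s : String) : pvRank s = 1 ∨ pvRank s = 2 ∨ pvRank s = 3 ∨ pvRank s = 4 := by
  unfold pvRank; dsimp only; split_ifs <;> simp

lemma pvRank_one (s : String) :
    (pvRank s = 1) ↔ (PySem.Str.strip s = "seed_reference" ∨ PySem.Str.strip s = "direct_neighbor") := by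
  unfold pvRank; dsimp only
  by_cases h : PySem.Str.strip s = "seed_reference" ∨ PySem.Str.strip s = "direct_neighbor"
  · rcases h with h | h <;> simp [h]
  · push Not at h; split_ifs <;> simp_all

lemma pvRank_two (s : String) : (pvRank s = 2) ↔ PySem.Str.strip s = "seed_related" := by
  unfold pvRank; dsimp only
  by_cases h : PySem.Str.strip s = "seed_related"
  · simp [h]
  · split_ifs <;> simp_all

lemma pvRank_three (s : String) : (pvRank s = 3) ↔ PySem.Str.strip s = "hard_negative" := by
  unfold pvRank; dsimp only
  by_cases h : PySem.Str.strip s = "hard_negative"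
  · simp [h]
  · split_ifs <;> simp_all

lemma pvRank_le (s : String) : pvRank s ≤ 4 := by
  rcases pvRank_cases s with h | h | h | h <;> omega

lemma contains_strip_set (xs : List String) (t : String) (ht : t ≠ "") :
    ((PySem.Set.ofList ((xs.map (fun item => PySem.Str.strip item)).filter (fun u => u ≠ ""))).contains t = true)
      ↔ ∃ s ∈ xs, PySem.Str.strip s = t := by
  rw [PySem.Set.contains_iff, PySem.Set.mem_ofList, List.mem_filter]
  simp only [List.mem_map, decide_not]
  constructor
  · rintro ⟨⟨s, hs, rfl⟩, -⟩; exact ⟨s, hs, rfl⟩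
  · rintro ⟨s, hs, rfl⟩; exact ⟨⟨s, hs, rfl⟩, by simpa using ht⟩

lemma foldl_min_shift (xs : List String) (b : Nat) (hb : b ≤ 4) :
    xs.foldl (fun b item => min b (pvRank item)) b
      = min b (xs.foldl (fun b item => min b (pvRank item)) 4) := by
  induction xs generalizing b with
  | nil => simp [Nat.min_def]; omega
  | cons x xs ih =>
      simp only [List.foldl_cons]
      have hx := pvRank_le x
      rw [ih (min b (pvRank x)) (by omega), ih (min 4 (pvRank x)) (by omega)]
      omega

lemma best_char (xs : List String) :
    xs.foldl (fun b item => min b (pvRank item)) 4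
      = if ∃ s ∈ xs, pvRank s = 1 then 1
        else if ∃ s ∈ xs, pvRank s = 2 then 2
        else if ∃ s ∈ xs, pvRank s = 3 then 3
        else 4 := by
  induction xs with
  | nil => simp
  | cons x xs ih =>
      simp only [List.foldl_cons]
      rw [foldl_min_shift xs (min 4 (pvRank x)) (by omega), ih]
      simp only [List.exists_mem_cons_iff]
      rcases pvRank_cases x with h | h | h | h <;>
        simp only [h] <;> split_ifs <;> simp_all [Nat.min_def] <;>
        (exfalso; rename_i hex
         obtain ⟨s, hs, hr⟩ := hex
         first
          | exact ‹∀ x ∈ xs, ¬pvRank x = 1› s hs hr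
          | exact ‹∀ x ∈ xs, ¬pvRank x = 2› s hs hr
          | exact ‹∀ x ∈ xs, ¬pvRank x = 3› s hs hr)

theorem provenance_group_py_spec_aux (origin_flags : Option (List String)) :
    provenance_group_py origin_flags = provenance_group_py_alt origin_flags := by
  unfold provenance_group_py provenance_group_py_alt
  rw [best_char]
  set xs := origin_flags.getD [] with hxs
  have C1 : ((PySem.Set.ofList ((xs.map (fun item => PySem.Str.strip item)).filter (fun u => u ≠ ""))).contains "seed_reference"
        || (PySem.Set.ofList ((xs.map (fun item => PySem.Str.strip item)).filter (fun u => u ≠ ""))).contains "direct_neighbor") = true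
      ↔ ∃ s ∈ xs, pvRank s = 1 := by
    rw [Bool.or_eq_true, contains_strip_set xs _ (by decide), contains_strip_set xs _ (by decide)]
    simp only [pvRank_one]
    constructor
    · rintro (⟨s, hs, h⟩ | ⟨s, hs, h⟩)
      · exact ⟨s, hs, Or.inl h⟩
      · exact ⟨s, hs, Or.inr h⟩
    · rintro ⟨s, hs, h | h⟩
      · exact Or.inl ⟨s, hs, h⟩
      · exact Or.inr ⟨s, hs, h⟩
  have C2 : ((PySem.Set.ofList ((xs.map (fun item => PySem.Str.strip item)).filter (fun u => u ≠ ""))).contains "seed_related" = true)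
      ↔ ∃ s ∈ xs, pvRank s = 2 := by
    rw [contains_strip_set xs _ (by decide)]; simp only [pvRank_two]
  have C3 : ((PySem.Set.ofList ((xs.map (fun item => PySem.Str.strip item)).filter (fun u => u ≠ ""))).contains "hard_negative" = true)
      ↔ ∃ s ∈ xs, pvRank s = 3 := by
    rw [contains_strip_set xs _ (by decide)]; simp only [pvRank_three]
  rw [if_congr C1 rfl rfl, if_congr C2 rfl rfl, if_congr C3 rfl rfl]
  by_cases h1 : ∃ s ∈ xs, pvRank s = 1 <;>
    by_cases h2 : ∃ s ∈ xs, pvRank s = 2 <;>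
      by_cases h3 : ∃ s ∈ xs, pvRank s = 3 <;>
        simp [h1, h2, h3]

-- ===== VERDICT (by name: the statement is the Claim_ definition above) =====
theorem provenance_group_py_spec : Claim_equal_provenance_group_py := by
  intro origin_flags _
  exact provenance_group_py_spec_aux origin_flags
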